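-- pv_equiv track=rewrite | github.com/butyr/leetcode-blind-75-questions | longest_palindromic_substring/solution.py | get_idxs_around_center
-- ===== SOURCE A (Python) =====
-- from typing import Tuple
--
-- def get_idxs_around_center(input_string: str, center_idx: int) -> Tuple[int, int]:
--     """
--     Computes the starting indices around the palindrome center.
--     Sometimes the center is not just a single character.
--     For that case the indices need to be adjusted.
--
--     :param input_string:
--     :param center_idx:
--     :return:
--     """
--
--     curr_idx_left = center_idx
--     curr_idx_right = center_idx
--
--     while (
--         curr_idx_left - 1 >= 0
--         and input_string[curr_idx_left - 1] == input_string[center_idx]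
--     ):
--         curr_idx_left -= 1
--
--     while (
--         curr_idx_right + 1 < len(input_string)
--         and input_string[curr_idx_right + 1] == input_string[center_idx]
--     ):
--         curr_idx_right += 1
--
--     return curr_idx_left, curr_idx_right
-- ===== SOURCE B (Python) =====
-- def get_idxs_around_center(input_string, center_idx):
--     # One forward sweep over the whole string: find the maximal run of equal
--     # characters that covers center_idx and return its (start, end) indices.
--     n = len(input_string)
--     run_start = 0
--     i = 1
--     while i <= n:
--         if i == n or input_string[i] != input_string[run_start]:
--             if run_start <= center_idx < i:
--                 return run_start, i - 1
--             run_start = i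
--         i += 1
--     raise IndexError("center_idx outside [0, len(input_string))")
-- ===== Notes on version B (the rewrite author's own statement) =====
-- stated objective: alternative
-- what changed: Replaces A's two local center-expansion loops by a single left-to-right sweep that delimits maximal runs of equal characters and returns the run covering center_idx.
-- outside the precondition, e.g. on get_idxs_around_center('aba', -1): A returns (-1, 0), B raises IndexError; on get_idxs_around_center('aa', -2): A returns (-2, 1), B raises IndexError
import Mathlib
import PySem

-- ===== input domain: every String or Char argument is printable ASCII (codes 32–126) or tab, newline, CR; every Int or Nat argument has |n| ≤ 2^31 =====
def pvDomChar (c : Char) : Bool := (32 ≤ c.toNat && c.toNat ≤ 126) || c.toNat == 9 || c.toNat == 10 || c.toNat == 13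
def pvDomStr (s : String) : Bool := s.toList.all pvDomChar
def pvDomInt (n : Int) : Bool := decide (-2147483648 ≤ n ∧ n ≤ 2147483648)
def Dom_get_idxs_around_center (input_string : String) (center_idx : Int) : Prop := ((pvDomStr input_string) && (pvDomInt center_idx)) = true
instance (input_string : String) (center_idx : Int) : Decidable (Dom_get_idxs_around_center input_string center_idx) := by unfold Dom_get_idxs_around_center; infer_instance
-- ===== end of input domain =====

-- B replaces A's two local center-expansion loops by one left-to-right sweep that
-- delimits maximal runs of equal characters and returns the run covering center_idx
-- (an alternative decomposition, not claimed faster). Equality of the RETURN value is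
-- proved on Pre_: 0 ≤ center_idx < len(input_string).

-- ===== PORT A =====
-- first while loop of A: move curr_idx_left down while the previous char equals s[center_idx]
def pvLeftLoopA (cs : List Char) (c : Int) (l : Int) : Nat → Int
  | 0 => l
  | f + 1 =>
    if l - 1 ≥ 0 ∧ PySem.List.pyGet? cs (l - 1) = PySem.List.pyGet? cs c then
      pvLeftLoopA cs c (l - 1) f
    else l

-- second while loop of A: move curr_idx_right up while the next char equals s[center_idx]
def pvRightLoopA (cs : List Char) (c : Int) (r : Int) : Nat → Int
  | 0 => r
  | f + 1 =>
    if r + 1 < (cs.length : Int) ∧ PySem.List.pyGet? cs (r + 1) = PySem.List.pyGet? cs c then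
      pvRightLoopA cs c (r + 1) f
    else r

def get_idxs_around_center (input_string : String) (center_idx : Int) : Int × Int :=
  (pvLeftLoopA input_string.toList center_idx center_idx (input_string.toList.length + 1),
   pvRightLoopA input_string.toList center_idx center_idx (input_string.toList.length + 1))

-- ===== PORT B =====
-- Source B's while loop: i sweeps 1..n; at each run boundary, return the run if it covers c,
-- else start a new run at i.  none = the final 'raise IndexError' of Source B.
def pvRunLoopB (cs : List Char) (c : Int) (runStart : Int) (i : Int) : Nat → Option (Int × Int)
  | 0 => none
  | f + 1 =>
    if i ≤ (cs.length : Int) then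
      if i = (cs.length : Int) ∨ PySem.List.pyGet? cs i ≠ PySem.List.pyGet? cs runStart then
        if runStart ≤ c ∧ c < i then some (runStart, i - 1)
        else pvRunLoopB cs c i (i + 1) f
      else pvRunLoopB cs c runStart (i + 1) f
    else none

def get_idxs_around_center_alt (input_string : String) (center_idx : Int) : Int × Int :=
  -- Source B's trailing 'raise IndexError' is the 'none' case; (0, 0) is reached only outside Pre_
  (pvRunLoopB input_string.toList center_idx 0 1 (input_string.toList.length + 1)).getD (0, 0)

-- ===== PRECONDITION & SPEC =====
-- Pre_ excludes center_idx outside [0, len(input_string)): there Python A either raises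
-- IndexError (|center_idx| beyond the string) or returns a value only via Python's
-- negative-index wraparound, and B's run sweep raises IndexError on all of them.
def Pre_get_idxs_around_center (input_string : String) (center_idx : Int) : Prop :=
  0 ≤ center_idx ∧ center_idx < (input_string.toList.length : Int)

instance (input_string : String) (center_idx : Int) : Decidable (Pre_get_idxs_around_center input_string center_idx) := by
  unfold Pre_get_idxs_around_center; infer_instance

def pvWitness_get_idxs_around_center : String × Int := ("abba", 2)

def Spec_get_idxs_around_center (input_string : String) (center_idx : Int) (out : Int × Int) : Prop := out = get_idxs_around_center_alt input_string center_idx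
instance (input_string : String) (center_idx : Int) (out : Int × Int) : Decidable (Spec_get_idxs_around_center input_string center_idx out) := by unfold Spec_get_idxs_around_center; infer_instance

-- ===== CLAIM (what is proved, stated in full; the proofs are below) =====
def Claim_equal_get_idxs_around_center : Prop := ∀ (input_string : String) (center_idx : Int), Dom_get_idxs_around_center input_string center_idx → Pre_get_idxs_around_center input_string center_idx → Spec_get_idxs_around_center input_string center_idx (get_idxs_around_center input_string center_idx)

-- ===== LEMMAS AND PROOFS =====

-- A's left loop: from a position l with everything in [l, c] equal to s[c], it reaches the
-- least such position (stopping exactly at 0 or at a differing previous character).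
theorem pvLeftLoopA_spec (cs : List Char) (c : Int) :
    ∀ (f : Nat) (l : Int), 0 ≤ l → l ≤ c → l.toNat < f →
      (∀ j, l ≤ j → j ≤ c → PySem.List.pyGet? cs j = PySem.List.pyGet? cs c) →
      0 ≤ pvLeftLoopA cs c l f ∧ pvLeftLoopA cs c l f ≤ c ∧
      (∀ j, pvLeftLoopA cs c l f ≤ j → j ≤ c → PySem.List.pyGet? cs j = PySem.List.pyGet? cs c) ∧
      (pvLeftLoopA cs c l f = 0 ∨ PySem.List.pyGet? cs (pvLeftLoopA cs c l f - 1) ≠ PySem.List.pyGet? cs c) := by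
  intro f
  induction f with
  | zero => intro l h0 _ hf _; omega
  | succ f ih =>
    intro l h0 hlc hf hinv
    rw [pvLeftLoopA]
    by_cases hcond : l - 1 ≥ 0 ∧ PySem.List.pyGet? cs (l - 1) = PySem.List.pyGet? cs c
    · rw [if_pos hcond]
      refine ih (l - 1) (by omega) (by omega) (by omega) ?_
      intro j hj1 hj2
      by_cases hj : j = l - 1
      · subst hj; exact hcond.2
      · exact hinv j (by omega) hj2
    · rw [if_neg hcond]
      refine ⟨h0, hlc, hinv, ?_⟩
      by_cases hl : l = 0
      · exact Or.inl hl
      · refine Or.inr ?_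
        intro hEq
        exact hcond ⟨by omega, hEq⟩

-- A's right loop: symmetrically reaches the greatest position with everything equal to s[c].
theorem pvRightLoopA_spec (cs : List Char) (c : Int) :
    ∀ (f : Nat) (r : Int), c ≤ r → r < (cs.length : Int) → ((cs.length : Int) - r).toNat ≤ f →
      (∀ j, c ≤ j → j ≤ r → PySem.List.pyGet? cs j = PySem.List.pyGet? cs c) →
      c ≤ pvRightLoopA cs c r f ∧ pvRightLoopA cs c r f < (cs.length : Int) ∧
      (∀ j, c ≤ j → j ≤ pvRightLoopA cs c r f → PySem.List.pyGet? cs j = PySem.List.pyGet? cs c) ∧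
      (pvRightLoopA cs c r f + 1 = (cs.length : Int) ∨ PySem.List.pyGet? cs (pvRightLoopA cs c r f + 1) ≠ PySem.List.pyGet? cs c) := by
  intro f
  induction f with
  | zero => intro r _ hr hf _; omega
  | succ f ih =>
    intro r hcr hr hf hinv
    rw [pvRightLoopA]
    by_cases hcond : r + 1 < (cs.length : Int) ∧ PySem.List.pyGet? cs (r + 1) = PySem.List.pyGet? cs c
    · rw [if_pos hcond]
      refine ih (r + 1) (by omega) hcond.1 (by omega) ?_
      intro j hj1 hj2
      by_cases hj : j = r + 1
      · subst hj; exact hcond.2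
      · exact hinv j hj1 (by omega)
    · rw [if_neg hcond]
      refine ⟨hcr, hr, hinv, ?_⟩
      by_cases hrn : r + 1 = (cs.length : Int)
      · exact Or.inl hrn
      · refine Or.inr ?_
        intro hEq
        exact hcond ⟨by omega, hEq⟩

-- B's sweep: under its loop invariant it returns SOME maximal run [a, b] containing c.
theorem pvRunLoopB_spec (cs : List Char) (c : Int) (_hc : 0 ≤ c) (hcn : c < (cs.length : Int)) :
    ∀ (f : Nat) (runStart i : Int), 0 ≤ runStart → runStart < i → i ≤ (cs.length : Int) →
      runStart ≤ c → ((cs.length : Int) - i).toNat < f →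
      (∀ j, runStart ≤ j → j < i → PySem.List.pyGet? cs j = PySem.List.pyGet? cs runStart) →
      (runStart = 0 ∨ PySem.List.pyGet? cs (runStart - 1) ≠ PySem.List.pyGet? cs runStart) →
      ∃ a b, pvRunLoopB cs c runStart i f = some (a, b) ∧
        0 ≤ a ∧ a ≤ c ∧ c ≤ b ∧ b < (cs.length : Int) ∧
        (∀ j, a ≤ j → j ≤ b → PySem.List.pyGet? cs j = PySem.List.pyGet? cs a) ∧
        (a = 0 ∨ PySem.List.pyGet? cs (a - 1) ≠ PySem.List.pyGet? cs a) ∧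
        (b + 1 = (cs.length : Int) ∨ PySem.List.pyGet? cs (b + 1) ≠ PySem.List.pyGet? cs b) := by
  intro f
  induction f with
  | zero => intro runStart i _ _ hi _ hf _ _; omega
  | succ f ih =>
    intro runStart i h0 hri hi hrc hf hrun hbound
    rw [pvRunLoopB, if_pos hi]
    by_cases hbd : i = (cs.length : Int) ∨ PySem.List.pyGet? cs i ≠ PySem.List.pyGet? cs runStart
    · rw [if_pos hbd]
      by_cases hin : runStart ≤ c ∧ c < i
      · rw [if_pos hin]
        refine ⟨runStart, i - 1, rfl, h0, hrc, by omega, by omega, ?_, hbound, ?_⟩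
        · intro j hj1 hj2; exact hrun j hj1 (by omega)
        · rcases hbd with h | h
          · exact Or.inl (by omega)
          · refine Or.inr ?_
            have hprev : PySem.List.pyGet? cs (i - 1) = PySem.List.pyGet? cs runStart :=
              hrun (i - 1) (by omega) (by omega)
            simpa [hprev] using h
      · -- run [runStart, i-1] does not cover c, so i ≤ c; start a new run at i
        have hic : i ≤ c := by omega
        have hiltn : i < (cs.length : Int) := by omega
        have hne : PySem.List.pyGet? cs i ≠ PySem.List.pyGet? cs runStart := by
          rcases hbd with h | h
          · omega
          · exact h
        rw [if_neg hin]
        refine ih i (i + 1) (by omega) (by omega) (by omega) hic (by omega) ?_ ?_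
        · intro j hj1 hj2
          have : j = i := by omega
          rw [this]
        · refine Or.inr ?_
          have hprev : PySem.List.pyGet? cs (i - 1) = PySem.List.pyGet? cs runStart :=
            hrun (i - 1) (by omega) (by omega)
          rw [hprev]
          exact fun h => hne h.symm
    · -- same run continues
      rw [if_neg hbd]
      push Not at hbd
      refine ih runStart (i + 1) h0 (by omega) (by omega) hrc (by omega) ?_ hbound
      intro j hj1 hj2
      by_cases hj : j = i
      · subst hj; exact hbd.2
      · exact hrun j hj1 (by omega)

-- ===== VERDICT (by name: the statement is the Claim_ definition above) =====
theorem get_idxs_around_center_spec : Claim_equal_get_idxs_around_center := by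
  intro s c _ hpre
  obtain ⟨hc0, hcn⟩ := hpre
  unfold Spec_get_idxs_around_center get_idxs_around_center get_idxs_around_center_alt
  set cs := s.toList with hcs
  -- A's two loops
  obtain ⟨hL0, hLc, hLrun, hLb⟩ :=
    pvLeftLoopA_spec cs c (cs.length + 1) c hc0 le_rfl (by omega)
      (fun j hj1 hj2 => by have : j = c := le_antisymm hj2 hj1; rw [this])
  obtain ⟨hRc, hRn, hRrun, hRb⟩ :=
    pvRightLoopA_spec cs c (cs.length + 1) c le_rfl hcn (by omega)
      (fun j hj1 hj2 => by have : j = c := le_antisymm hj2 hj1; rw [this])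
  set L := pvLeftLoopA cs c c (cs.length + 1)
  set R := pvRightLoopA cs c c (cs.length + 1)
  -- B's sweep
  obtain ⟨a, b, hrun_eq, ha0, hac, hcb, hbn, habrun, hab_l, hab_r⟩ :=
    pvRunLoopB_spec cs c hc0 hcn (cs.length + 1) 0 1 le_rfl (by omega) (by omega) hc0
      (by omega) (fun j hj1 hj2 => congrArg (PySem.List.pyGet? cs) (by omega)) (Or.inl rfl)
  rw [hrun_eq]
  -- s[c] and s[a] agree since c lies in the run [a, b]
  have hca : PySem.List.pyGet? cs c = PySem.List.pyGet? cs a := habrun c hac hcb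
  -- L = a
  have hLa : L = a := by
    rcases lt_trichotomy L a with h | h | h
    · exfalso
      have hne : PySem.List.pyGet? cs (a - 1) ≠ PySem.List.pyGet? cs a := by
        rcases hab_l with h' | h'
        · omega
        · exact h'
      exact hne (by rw [← hca]; exact hLrun (a - 1) (by omega) (by omega))
    · exact h
    · exfalso
      have hne : PySem.List.pyGet? cs (L - 1) ≠ PySem.List.pyGet? cs c := by
        rcases hLb with h' | h'
        · omega
        · exact h'
      exact hne (by rw [hca]; exact habrun (L - 1) (by omega) (by omega))
  -- R = b
  have hRbEq : R = b := by
    rcases lt_trichotomy R b with h | h | h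
    · exfalso
      have hne : PySem.List.pyGet? cs (R + 1) ≠ PySem.List.pyGet? cs c := by
        rcases hRb with h' | h'
        · omega
        · exact h'
      exact hne (by rw [hca]; exact habrun (R + 1) (by omega) (by omega))
    · exact h
    · exfalso
      have hba : PySem.List.pyGet? cs b = PySem.List.pyGet? cs a := habrun b (by omega) (le_refl b)
      have hne : PySem.List.pyGet? cs (b + 1) ≠ PySem.List.pyGet? cs b := by
        rcases hab_r with h' | h'
        · omega
        · exact h'
      refine hne ?_
      rw [hba, ← hca]
      exact hRrun (b + 1) (by omega) (by omega)
  simp [hLa, hRbEq]
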